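-- pv_equiv track=rewrite | github.com/hypergraphman/2GruppaEGE24 | task23/3_rec.py | f
-- ===== SOURCE A (Python) =====
-- def f(st, fin):
--     if st == 15 or st == 5 or st < fin:
--         return 0
--     if st == fin:
--         return 1
--     moves = [
--         f(st - 1, fin),
--         f(st - 4, fin),
--         f(st // 2, fin)
--     ]
--     return sum(moves)
-- ===== SOURCE B (Python) =====
-- def f(st, fin):
--     if st < fin or st == 5 or st == 15:
--         return 0
--     g = {}
--     for s in range(fin, st + 1):
--         if s == 5 or s == 15:
--             g[s] = 0
--         elif s == fin:
--             g[s] = 1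
--         else:
--             g[s] = (g[s - 1]
--                     + (g[s - 4] if s - 4 >= fin else 0)
--                     + (g[s // 2] if s // 2 >= fin else 0))
--     return g[st]
-- ===== Notes on version B (the rewrite author's own statement) =====
-- stated objective: alternative
-- what changed: Replaced the triple-branching top-down recursion by a bottom-up dynamic program that fills a table from fin up to st once, reading each smaller state from the table.
import Mathlib
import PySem

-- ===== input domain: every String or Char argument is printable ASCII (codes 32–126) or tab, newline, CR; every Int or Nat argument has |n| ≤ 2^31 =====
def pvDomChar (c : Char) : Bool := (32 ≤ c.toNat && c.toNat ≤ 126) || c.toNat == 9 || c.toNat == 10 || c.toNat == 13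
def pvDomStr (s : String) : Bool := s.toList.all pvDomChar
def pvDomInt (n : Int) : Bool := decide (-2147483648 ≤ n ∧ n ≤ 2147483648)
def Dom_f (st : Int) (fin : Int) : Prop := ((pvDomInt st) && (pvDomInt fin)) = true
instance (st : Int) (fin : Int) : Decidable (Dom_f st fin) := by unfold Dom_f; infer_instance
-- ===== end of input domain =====

-- B replaces A's top-down three-way recursion by a bottom-up table filled once from fin to st (objective: alternative algorithm).

-- ===== PORT A =====
-- A's recursion does not terminate for fin < 0 < st - fin (st//2 loops at 0 and -1), so the
-- literal transliteration carries a fuel argument; (st - fin).toNat + 1 fuel is enough on Pre_f.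
def fAux : Nat → Int → Int → Int
  | 0, _, _ => 0
  | fuel + 1, st, fin =>
    if st = 15 ∨ st = 5 ∨ st < fin then 0
    else if st = fin then 1
    else fAux fuel (st - 1) fin + fAux fuel (st - 4) fin
         + fAux fuel (PySem.Int.floordiv st 2) fin

def f (st : Int) (fin : Int) : Int := fAux ((st - fin).toNat + 1) st fin

-- ===== PORT B =====
-- step of Source B's loop body (g is the dict, s the loop variable)
def fStep (fin : Int) (g : PySem.Dict Int Int) (s : Int) : PySem.Dict Int Int :=
  if s = 5 ∨ s = 15 then g.insert s 0
  else if s = fin then g.insert s 1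
  else g.insert s
    (g.getD (s - 1) 0
      + (if fin ≤ s - 4 then g.getD (s - 4) 0 else 0)
      + (if fin ≤ PySem.Int.floordiv s 2 then g.getD (PySem.Int.floordiv s 2) 0 else 0))

def f_alt (st : Int) (fin : Int) : Int :=
  if st < fin ∨ st = 5 ∨ st = 15 then 0
  else
    let g := (PySem.List.pyRange fin (st + 1) 1).foldl (fStep fin) PySem.Dict.empty
    g.getD st 0

-- ===== PRECONDITION & SPEC =====
-- Pre_f excludes exactly the inputs where A's recursion diverges (Python raises RecursionError):
-- fin < 0 with st > fin and st ∉ {5, 15}; A returns on every admitted input.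
def Pre_f (st : Int) (fin : Int) : Prop := 0 ≤ fin ∨ st ≤ fin ∨ st = 5 ∨ st = 15
instance (st : Int) (fin : Int) : Decidable (Pre_f st fin) := by unfold Pre_f; infer_instance
def pvWitness_f : Int × Int := (20, 3)

def Spec_f (st : Int) (fin : Int) (out : Int) : Prop := out = f_alt st fin
instance (st : Int) (fin : Int) (out : Int) : Decidable (Spec_f st fin out) := by unfold Spec_f; infer_instance

-- ===== CLAIM (what is proved, stated in full; the proofs are below) =====
def Claim_equal_f : Prop := ∀ (st : Int) (fin : Int), Dom_f st fin → Pre_f st fin → Spec_f st fin (f st fin)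

-- ===== LEMMAS AND PROOFS =====

-- reference function: the count A computes, defined by well-founded recursion (valid since the
-- only uses are at 0 ≤ fin, where the extra `s ≤ 0` guard is never reached)
def F (fin : Int) (s : Int) : Int :=
  if s = 15 ∨ s = 5 ∨ s < fin then 0
  else if s = fin then 1
  else if s ≤ 0 then 0
  else F fin (s - 1) + F fin (s - 4) + F fin (PySem.Int.floordiv s 2)
termination_by s.toNat
decreasing_by
  · omega
  · omega
  · simp only [PySem.Int.floordiv_eq_ediv_of_pos (by norm_num : (0:Int) < 2)]
    omega

theorem fAux_eq_F (fin : Int) (hfin : 0 ≤ fin) :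
    ∀ (fuel : Nat) (st : Int), (st - fin).toNat < fuel → fAux fuel st fin = F fin st := by
  intro fuel
  induction fuel with
  | zero => intro st h; omega
  | succ fuel ih =>
    intro st h
    rw [fAux, F]
    by_cases h1 : st = 15 ∨ st = 5 ∨ st < fin
    · simp [h1]
    · simp only [if_neg h1]
      by_cases h2 : st = fin
      · simp [h2]
      · simp only [if_neg h2]
        have hgt : fin < st := by omega
        have hpos : ¬ st ≤ 0 := by omega
        have hdiv : PySem.Int.floordiv st 2 = st / 2 := by
          exact PySem.Int.floordiv_eq_ediv_of_pos (by norm_num)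
        rw [if_neg hpos, ih (st - 1) (by omega), ih (st - 4) (by omega),
            ih (PySem.Int.floordiv st 2) (by rw [hdiv]; omega)]

theorem getD_insert' (g : PySem.Dict Int Int) (k v s : Int) :
    (g.insert k v).getD s 0 = if s = k then v else g.getD s 0 := by
  by_cases h : s = k
  · simp [h, PySem.Dict.getD, PySem.Dict.get?_insert_self]
  · simp [PySem.Dict.getD, PySem.Dict.get?_insert_of_ne g v h, h]

theorem fold_invariant (fin : Int) (hfin : 0 ≤ fin) :
    ∀ (n : Nat) (s : Int),
      ((PySem.List.pyRange fin (fin + n) 1).foldl (fStep fin) PySem.Dict.empty).getD s 0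
        = if fin ≤ s ∧ s < fin + n then F fin s else 0 := by
  intro n
  induction n with
  | zero =>
    intro s
    rw [PySem.List.pyRange_one_eq_nil (by omega)]
    simp only [List.foldl]
    rw [if_neg (by push_cast; omega)]
    rfl
  | succ n ih =>
    intro s
    have hsplit : PySem.List.pyRange fin (fin + (n + 1 : Nat)) 1
        = PySem.List.pyRange fin (fin + n) 1 ++ [fin + n] := by
      have : (fin + (n + 1 : Nat)) = (fin + n) + 1 := by push_cast; ring
      rw [this, PySem.List.pyRange_one_succ_right (by omega)]
    rw [hsplit, List.foldl_append]
    set t : Int := fin + n with ht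
    simp only [List.foldl]
    rw [fStep]
    by_cases h1 : t = 5 ∨ t = 15
    · rw [if_pos h1, getD_insert']
      by_cases hs : s = t
      · rw [if_pos hs, if_pos (by omega)]
        rcases h1 with h1 | h1 <;> rw [hs, h1, F] <;> simp
      · rw [if_neg hs, ih s]
        have : (fin ≤ s ∧ s < t) ↔ (fin ≤ s ∧ s < fin + (n + 1 : Nat)) := by
          push_cast; omega
        by_cases hr : fin ≤ s ∧ s < t
        · rw [if_pos hr, if_pos (this.mp hr)]
        · rw [if_neg hr, if_neg (fun hc => hr (by push_cast at hc ⊢; omega))]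
    · rw [if_neg h1]
      by_cases h2 : t = fin
      · rw [if_pos h2, getD_insert']
        by_cases hs : s = t
        · rw [if_pos hs, if_pos (by omega), hs, h2, F]
          have : ¬ (fin = 15 ∨ fin = 5 ∨ fin < fin) := by
            rw [h2] at h1; omega
          rw [if_neg this, if_pos rfl]
        · rw [if_neg hs, ih s]
          by_cases hr : fin ≤ s ∧ s < t
          · rw [if_pos hr, if_pos (by push_cast; omega)]
          · rw [if_neg hr, if_neg (fun hc => hr (by push_cast at hc ⊢; omega))]
      · rw [if_neg h2, getD_insert']
        have hgt : fin < t := by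
          have : fin ≤ t := by omega
          omega
        have hdiv : PySem.Int.floordiv t 2 = t / 2 :=
          PySem.Int.floordiv_eq_ediv_of_pos (by norm_num)
        by_cases hs : s = t
        · have e1 : ((PySem.List.pyRange fin t 1).foldl (fStep fin) PySem.Dict.empty).getD (t - 1) 0
              = F fin (t - 1) := by rw [ih (t - 1), if_pos (by omega)]
          have e2 : (if fin ≤ t - 4 then
                ((PySem.List.pyRange fin t 1).foldl (fStep fin) PySem.Dict.empty).getD (t - 4) 0
              else 0) = F fin (t - 4) := by
            by_cases h4 : fin ≤ t - 4
            · rw [if_pos h4, ih (t - 4), if_pos (by omega)]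
            · rw [if_neg h4, F, if_pos (by omega)]
          have e3 : (if fin ≤ PySem.Int.floordiv t 2 then
                ((PySem.List.pyRange fin t 1).foldl (fStep fin) PySem.Dict.empty).getD
                  (PySem.Int.floordiv t 2) 0
              else 0) = F fin (PySem.Int.floordiv t 2) := by
            by_cases hq : fin ≤ PySem.Int.floordiv t 2
            · rw [if_pos hq, ih (PySem.Int.floordiv t 2),
                 if_pos (by rw [hdiv] at hq ⊢; omega)]
            · rw [if_neg hq, F, if_pos (by omega)]
          have hF : F fin t = F fin (t - 1) + F fin (t - 4) + F fin (PySem.Int.floordiv t 2) := by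
            rw [F, if_neg (by omega), if_neg h2, if_neg (by omega)]
          rw [if_pos hs, hs, e2, e3, e1, if_pos (show fin ≤ t ∧ t < fin + (((n + 1 : Nat)) : Int) by
            constructor <;> push_cast <;> omega), hF]
        · rw [if_neg hs, ih s]
          by_cases hr : fin ≤ s ∧ s < t
          · rw [if_pos hr, if_pos (by push_cast; omega)]
          · rw [if_neg hr, if_neg (fun hc => hr (by push_cast at hc ⊢; omega))]

theorem f_eq_F (st fin : Int) (hfin : 0 ≤ fin) : f st fin = F fin st := by
  rw [f]
  exact fAux_eq_F fin hfin _ st (by omega)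

theorem f_alt_eq_F (st fin : Int) (hfin : 0 ≤ fin) (hle : fin ≤ st)
    (h5 : st ≠ 5) (h15 : st ≠ 15) : f_alt st fin = F fin st := by
  rw [f_alt, if_neg (by omega)]
  have hn : st + 1 = fin + ((st + 1 - fin).toNat : Int) := by omega
  show ((PySem.List.pyRange fin (st + 1) 1).foldl (fStep fin) PySem.Dict.empty).getD st 0 = F fin st
  rw [hn, fold_invariant fin hfin, if_pos (by omega)]

-- ===== VERDICT (by name: the statement is the Claim_ definition above) =====
theorem f_spec : Claim_equal_f := by
  intro st fin _ hpre
  unfold Spec_f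
  by_cases h0 : st < fin ∨ st = 5 ∨ st = 15
  · rw [f_alt, if_pos h0, f, fAux, if_pos (by omega)]
  · push Not at h0
    obtain ⟨hlt, h5, h15⟩ := h0
    by_cases hfin : 0 ≤ fin
    · rw [f_eq_F st fin hfin, f_alt_eq_F st fin hfin (by omega) h5 h15]
    · -- Pre_f with fin < 0 forces st = fin: both programs return 1
      have hst : st = fin := by
        rcases hpre with h | h | h | h <;> omega
      subst hst
      have hA : f st st = 1 := by
        rw [f]
        simp only [sub_self, Int.toNat_zero]
        rw [fAux]
        rw [if_neg (by omega : ¬(st = 15 ∨ st = 5 ∨ st < st))]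
        simp
      have hB : f_alt st st = 1 := by
        rw [f_alt, if_neg (by omega)]
        show ((PySem.List.pyRange st (st + 1) 1).foldl (fStep st) PySem.Dict.empty).getD st 0 = 1
        rw [PySem.List.pyRange_one_succ_right (by omega), PySem.List.pyRange_one_eq_nil (by omega)]
        simp only [List.nil_append, List.foldl]
        rw [fStep, if_neg (by omega), if_pos rfl, getD_insert', if_pos rfl]
      rw [hA, hB]
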